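-- pv_equiv track=rewrite | github.com/ahdavies6/NLP_QA | src/text_analyzer.py | get_contiguous_x_phrases
-- ===== SOURCE A (Python) =====
-- def restring(sentence):
--     result = []
--     for word in sentence:
--         result.append(word[0])
--
--     return ' '.join(result)
--
-- def get_contiguous_x_phrases(tagged_sentence, tag):
--     x_phrases = []
--     x_words = []
--     for word in tagged_sentence:
--         if word[1] == tag:
--             x_words.append(word)
--         elif len(x_words) > 0:
--             x_phrases.append(restring(x_words))
--             x_words.clear()
--     if len(x_words) > 0:
--         x_phrases.append(restring(x_words))
--         x_words.clear()
--
--     return x_phrases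
-- ===== SOURCE B (Python) =====
-- def get_contiguous_x_phrases(tagged_sentence, tag):
--     phrases = []
--     i = 0
--     n = len(tagged_sentence)
--     while i < n:
--         if tagged_sentence[i][1] != tag:
--             i += 1
--         else:
--             j = i
--             while j < n and tagged_sentence[j][1] == tag:
--                 j += 1
--             phrases.append(' '.join(w[0] for w in tagged_sentence[i:j]))
--             i = j
--     return phrases
-- ===== Notes on version B (the rewrite author's own statement) =====
-- stated objective: alternative
-- what changed: Replaces the stateful buffer/elif-flush/post-loop-flush pass with a two-pointer run scan: advance a second index over each maximal run of matching tags and join that slice directly, so no buffer list or flush logic exists.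
import Mathlib
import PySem

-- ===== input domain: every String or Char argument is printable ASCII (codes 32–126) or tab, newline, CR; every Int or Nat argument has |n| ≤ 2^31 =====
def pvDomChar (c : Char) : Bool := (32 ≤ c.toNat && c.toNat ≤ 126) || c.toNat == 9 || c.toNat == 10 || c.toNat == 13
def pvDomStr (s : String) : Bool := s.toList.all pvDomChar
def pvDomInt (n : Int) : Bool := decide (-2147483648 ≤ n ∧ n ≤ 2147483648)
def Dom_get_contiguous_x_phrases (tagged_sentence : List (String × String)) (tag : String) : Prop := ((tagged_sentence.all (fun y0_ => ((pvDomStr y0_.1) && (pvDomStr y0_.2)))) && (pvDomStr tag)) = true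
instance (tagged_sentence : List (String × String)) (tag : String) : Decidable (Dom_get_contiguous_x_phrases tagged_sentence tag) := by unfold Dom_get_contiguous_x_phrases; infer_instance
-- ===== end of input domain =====

-- B replaces A's buffer/flush state machine with a two-pointer run scan (equal cost, no buffer); return values proved equal on all inputs.

-- ===== PORT A =====
def restring (sentence : List (String × String)) : String :=
  PySem.Str.join " " (sentence.foldl (fun result word => result ++ [word.1]) [])

def get_contiguous_x_phrases (tagged_sentence : List (String × String)) (tag : String) : List String :=
  let st := tagged_sentence.foldl
    (fun (st : List String × List (String × String)) word =>
      if word.2 == tag then (st.1, st.2 ++ [word])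
      else if 0 < st.2.length then (st.1 ++ [restring st.2], [])
      else st)
    ([], [])
  if 0 < st.2.length then st.1 ++ [restring st.2] else st.1

-- ===== PORT B =====
-- inner while loop of Source B: advance over the maximal run of matching tags,
-- returning the run's words (the slice tagged_sentence[i:j] projected) and the remaining suffix
def altSpan (tag : String) : List (String × String) → List String × List (String × String)
  | [] => ([], [])
  | w :: rest =>
    if w.2 == tag then
      let p := altSpan tag rest
      (w.1 :: p.1, p.2)
    else ([], w :: rest)

theorem altSpan_len (tag : String) (l : List (String × String)) :
    (altSpan tag l).2.length ≤ l.length := by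
  induction l with
  | nil => simp [altSpan]
  | cons w rest ih =>
    simp only [altSpan]
    split
    · exact Nat.le_succ_of_le ih
    · simp

-- outer while loop of Source B, as the obvious recursion on the unprocessed suffix
def altGo (tag : String) : List (String × String) → List String
  | [] => []
  | w :: rest =>
    if w.2 == tag then
      let p := altSpan tag rest
      PySem.Str.join " " (w.1 :: p.1) :: altGo tag p.2
    else altGo tag rest
termination_by l => l.length
decreasing_by
  · exact Nat.lt_succ_of_le (altSpan_len tag rest)
  · simp

def get_contiguous_x_phrases_alt (tagged_sentence : List (String × String)) (tag : String) : List String :=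
  altGo tag tagged_sentence

-- ===== PRECONDITION & SPEC =====
def Spec_get_contiguous_x_phrases (tagged_sentence : List (String × String)) (tag : String) (out : List String) : Prop := out = get_contiguous_x_phrases_alt tagged_sentence tag
instance (tagged_sentence : List (String × String)) (tag : String) (out : List String) : Decidable (Spec_get_contiguous_x_phrases tagged_sentence tag out) := by unfold Spec_get_contiguous_x_phrases; infer_instance

-- ===== CLAIM (what is proved, stated in full; the proofs are below) =====
def Claim_equal_get_contiguous_x_phrases : Prop := ∀ (tagged_sentence : List (String × String)) (tag : String), Dom_get_contiguous_x_phrases tagged_sentence tag → Spec_get_contiguous_x_phrases tagged_sentence tag (get_contiguous_x_phrases tagged_sentence tag)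

-- ===== LEMMAS AND PROOFS =====

theorem foldl_snoc_fst (l : List (String × String)) (acc : List String) :
    l.foldl (fun result word => result ++ [word.1]) acc = acc ++ l.map Prod.fst := by
  induction l generalizing acc with
  | nil => simp
  | cons w rest ih => simp [List.foldl, ih]

theorem restring_eq (l : List (String × String)) :
    restring l = PySem.Str.join " " (l.map Prod.fst) := by
  unfold restring; rw [foldl_snoc_fst]; simp

theorem altGo_nil (tag : String) : altGo tag [] = [] := by rw [altGo]

theorem main_lemma (tag : String) (ts : List (String × String))
    (ph : List String) (buf : List (String × String)) :
    (let st := ts.foldl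
        (fun (st : List String × List (String × String)) word =>
          if word.2 == tag then (st.1, st.2 ++ [word])
          else if 0 < st.2.length then (st.1 ++ [restring st.2], [])
          else st)
        (ph, buf)
     if 0 < st.2.length then st.1 ++ [restring st.2] else st.1)
    = ph ++ (if buf = [] then altGo tag ts
             else PySem.Str.join " " (buf.map Prod.fst ++ (altSpan tag ts).1)
                    :: altGo tag (altSpan tag ts).2) := by
  induction ts generalizing ph buf with
  | nil =>
    by_cases hb : buf = []
    · simp [hb, altGo_nil]
    · simp [hb, List.length_pos_iff.mpr hb, altSpan, altGo_nil, restring_eq]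
  | cons w rest ih =>
    simp only [List.foldl_cons]
    by_cases ht : w.2 == tag
    · simp only [ht, if_pos]
      rw [ih]
      by_cases hb : buf = []
      · simp [hb, altGo, ht]
      · simp [hb, altSpan, ht]
    · simp only [ht, if_neg, Bool.false_eq_true, not_false_iff]
      by_cases hb : buf = []
      · simp only [hb, List.length_nil, Nat.lt_irrefl, if_false]
        rw [ih]
        simp [altGo, ht]
      · simp only [List.length_pos_iff.mpr hb, if_pos]
        rw [ih]
        simp [hb, altGo, altSpan, ht, restring_eq]

-- ===== VERDICT (by name: the statement is the Claim_ definition above) =====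
theorem get_contiguous_x_phrases_spec : Claim_equal_get_contiguous_x_phrases := by
  intro ts tag _
  unfold Spec_get_contiguous_x_phrases get_contiguous_x_phrases get_contiguous_x_phrases_alt
  have h := main_lemma tag ts [] []
  simpa using h
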